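-- pv_equiv track=rewrite | github.com/Pashatishinin/Hillel_School | DAY9/Lesson9_5.py | one_count_symbol
-- ===== SOURCE A (Python) =====
-- def one_count_symbol(my_str):
--     my_str = my_str.split(" ")
--     new_str = []
--     for i in my_str:
--         for j in i:
--             if j not in new_str:
--                 new_str.append(j)
--             else:
--                 new_str.remove(j)
--     return new_str
-- ===== SOURCE B (Python) =====
-- def one_count_symbol(my_str):
--     counts = {}
--     for ch in my_str:
--         if ch != ' ':
--             counts[ch] = counts.get(ch, 0) + 1
--     out = []
--     seen = set()
--     for ch in reversed(my_str):
--         if ch != ' ' and ch not in seen: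
--             seen.add(ch)
--             if counts[ch] % 2 == 1:
--                 out.append(ch)
--     out.reverse()
--     return out
-- ===== Notes on version B (the rewrite author's own statement) =====
-- stated objective: alternative
-- what changed: A toggles each character in/out of a result list (membership test and removal per char); B instead makes one counting pass (parity per char) and one scan of the reversed string emitting first-seen chars with odd count, then reverses; it avoids A's per-character scans of the result list but is not measurably faster on realistic alphabets.
import Mathlib
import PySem

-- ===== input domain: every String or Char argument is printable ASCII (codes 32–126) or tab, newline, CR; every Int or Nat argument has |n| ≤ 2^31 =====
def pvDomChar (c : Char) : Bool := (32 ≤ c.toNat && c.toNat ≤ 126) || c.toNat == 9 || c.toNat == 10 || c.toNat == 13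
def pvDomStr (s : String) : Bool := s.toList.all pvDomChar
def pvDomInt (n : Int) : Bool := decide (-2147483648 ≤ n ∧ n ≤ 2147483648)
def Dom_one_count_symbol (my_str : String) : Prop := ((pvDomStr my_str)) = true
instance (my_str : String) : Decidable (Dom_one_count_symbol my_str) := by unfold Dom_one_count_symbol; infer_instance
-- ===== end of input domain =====

-- B replaces A's membership-toggle list with a different algorithm: one counting pass plus one
-- reverse scan (parity per char, emitted by last occurrence); the equivalence of the two orders is proved below.

-- ===== PORT A =====
-- A: split on " ", then for each char toggle membership in new_str (append if absent, remove if present).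
def one_count_symbol (my_str : String) : List String :=
  let words := (PySem.Str.split? my_str " ").getD []  -- sep " " is nonempty, so split? is always `some`
  words.foldl
    (fun new_str i =>
      i.toList.foldl
        (fun ns j =>
          let js := String.ofList [j]
          if !ns.contains js then ns ++ [js]
          else ns.erase js)  -- here js ∈ ns, so list.remove = erase (PySem.List.remove?_eq_some_erase)
        new_str)
    []

-- ===== PORT B =====
-- B: one pass counting occurrences of each non-space char, then one scan of the reversed string
-- collecting first-seen chars with odd count, reversed at the end.
def one_count_symbol_alt (my_str : String) : List String :=
  let counts : PySem.Dict String Int :=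
    my_str.toList.foldl
      (fun d ch => if ch ≠ ' ' then d.modify (String.ofList [ch]) 0 (· + 1) else d)
      PySem.Dict.empty
  let scanned :=
    my_str.toList.reverse.foldl
      (fun (st : List String × PySem.Set String) ch =>
        if ch ≠ ' ' then
          (let s := String.ofList [ch]
           if !st.2.contains s then
             ((if PySem.Int.mod (counts.getD s 0) 2 == 1 then st.1 ++ [s] else st.1), st.2.add s)
           else st)
        else st)
      ([], PySem.Set.empty)
  scanned.1.reverse

-- ===== PRECONDITION & SPEC =====
def Spec_one_count_symbol (my_str : String) (out : List String) : Prop := out = one_count_symbol_alt my_str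
instance (my_str : String) (out : List String) : Decidable (Spec_one_count_symbol my_str out) := by unfold Spec_one_count_symbol; infer_instance

-- ===== CLAIM (what is proved, stated in full; the proofs are below) =====
def Claim_equal_one_count_symbol : Prop := ∀ (my_str : String), Dom_one_count_symbol my_str → Spec_one_count_symbol my_str (one_count_symbol my_str)

-- ===== LEMMAS AND PROOFS =====

theorem pvDedupAppendSingleton (l : List String) (c : String) :
    (l ++ [c]).dedup = l.dedup.erase c ++ [c] := by
  induction l with
  | nil => simp
  | cons a l ih =>
    by_cases hal : a ∈ l ++ [c]
    · rw [List.cons_append, List.dedup_cons_of_mem hal, ih]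
      rcases List.mem_append.1 hal with h | h
      · rw [List.dedup_cons_of_mem h]
      · simp only [List.mem_singleton] at h
        subst h
        by_cases hml : a ∈ l
        · rw [List.dedup_cons_of_mem hml]
        · rw [List.dedup_cons_of_notMem hml, List.erase_cons_head]
          rw [List.erase_of_not_mem (by simpa using hml)]
    · have hl : a ∉ l := fun h => hal (List.mem_append.2 (Or.inl h))
      have hc : a ≠ c := by simp_all
      rw [List.cons_append, List.dedup_cons_of_notMem hal, ih,
        List.dedup_cons_of_notMem hl, List.erase_cons_tail (by simpa using hc)]
      rfl

theorem pvFilterEraseOfNeg (p : String → Bool) (c : String) (h : p c = false) (l : List String) :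
    (l.erase c).filter p = l.filter p := by
  induction l with
  | nil => simp
  | cons a l ih =>
    by_cases hac : a = c
    · subst hac; rw [List.erase_cons_head]; simp [h]
    · rw [List.erase_cons_tail (by simpa using hac)]
      simp [List.filter_cons, ih]

theorem pvToggleEq (l : List String) :
    l.foldl (fun ns j => if !ns.contains j then ns ++ [j] else ns.erase j) [] =
      l.dedup.filter (fun c => decide (l.count c % 2 = 1)) := by
  induction l using List.reverseRecOn with
  | nil => simp
  | append_singleton l c ih =>
    rw [List.foldl_append, List.foldl_cons, List.foldl_nil, ih, pvDedupAppendSingleton]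
    have hcnt : ∀ x : String, (l ++ [c]).count x = l.count x + (if x = c then 1 else 0) := by
      intro x; simp [List.count_append, List.count_singleton]; split_ifs <;> simp_all
    have hmemF : (l.dedup.filter (fun x => decide (l.count x % 2 = 1))).contains c
        = decide (l.count c % 2 = 1) := by
      rw [Bool.eq_iff_iff]
      by_cases h : l.count c % 2 = 1
      · have hc : c ∈ l := List.count_pos_iff.1 (by omega)
        simp [List.mem_filter, List.mem_dedup, hc, h]
      · simp [List.mem_filter, h]
    have hagree : ∀ x, x ≠ c → (l ++ [c]).count x = l.count x := by
      intro x hx; rw [hcnt]; simp [hx]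
    have hnodup : l.dedup.Nodup := l.nodup_dedup
    by_cases h : l.count c % 2 = 1
    · -- count becomes even: c is removed
      have hc0 : (!(l.dedup.filter (fun x => decide (l.count x % 2 = 1))).contains c) = false := by
        rw [hmemF]; simp [h]
      rw [hc0, if_neg Bool.false_ne_true, List.filter_append]
      have hc' : ((l ++ [c]).count c) % 2 = 0 := by rw [hcnt, if_pos rfl]; omega
      have h1 : (List.filter (fun x => decide ((l ++ [c]).count x % 2 = 1)) [c]) = [] := by
        simp; omega
      rw [h1, List.append_nil]
      have hnodupF : (l.dedup.filter (fun x => decide (l.count x % 2 = 1))).Nodup :=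
        hnodup.filter _
      rw [hnodupF.erase_eq_filter, List.filter_filter, hnodup.erase_eq_filter, List.filter_filter]
      apply List.filter_congr
      intro x hx
      by_cases hxc : x = c
      · subst hxc; simp [h]
      · simp [hagree x hxc, hxc, Bool.and_comm]
    · -- count becomes odd: c is appended
      have hc0 : (!(l.dedup.filter (fun x => decide (l.count x % 2 = 1))).contains c) = true := by
        rw [hmemF]; simp [h]
      rw [hc0, if_pos rfl, List.filter_append]
      have hc' : ((l ++ [c]).count c) % 2 = 1 := by rw [hcnt, if_pos rfl]; omega
      have h1 : (List.filter (fun x => decide ((l ++ [c]).count x % 2 = 1)) [c]) = [c] := by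
        simp; omega
      rw [h1]
      congr 1
      rw [hnodup.erase_eq_filter, List.filter_filter]
      apply List.filter_congr
      intro x hx
      by_cases hxc : x = c
      · subst hxc; simp [h]
      · simp [hagree x hxc, hxc, Bool.and_comm]

def pvScan (q : String → Bool) : List String → PySem.Set String → List String
  | [], _ => []
  | x :: r, seen =>
    if seen.contains x then pvScan q r seen
    else (if q x then [x] else []) ++ pvScan q r (seen.add x)

theorem pvScanFoldEq (q : String → Bool) (r : List String) (out : List String) (seen : PySem.Set String) :
    (r.foldl
      (fun (st : List String × PySem.Set String) x =>
        if !st.2.contains x then ((if q x then st.1 ++ [x] else st.1), st.2.add x) else st)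
      (out, seen)).1 = out ++ pvScan q r seen := by
  induction r generalizing out seen with
  | nil => simp [pvScan]
  | cons x r ih =>
    rw [List.foldl_cons]
    by_cases h : seen.contains x = true
    · have hm : x ∈ seen := (PySem.Set.contains_iff seen x).1 h
      have hc : ¬((!seen.contains x) = true) := by rw [h]; simp
      rw [if_neg hc]
      simp only [pvScan]
      rw [if_pos h, ih]
    · have hm : x ∉ seen := fun hx => h ((PySem.Set.contains_iff seen x).2 hx)
      have h' : seen.contains x = false := by simpa [PySem.Set.contains_iff] using hm
      have hc : (!seen.contains x) = true := by rw [h']; rfl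
      rw [if_pos hc]
      simp only [pvScan]
      rw [if_neg h, ih]
      rcases hq : q x with _ | _ <;> simp [hq]

theorem pvSetContainsAdd (s : PySem.Set String) (x y : String) :
    (s.add x).contains y = (s.contains y || y == x) := by
  rw [Bool.eq_iff_iff]
  simp [PySem.Set.contains_iff, PySem.Set.mem_add]

theorem pvScanReverse (q : String → Bool) (r : List String) (seen : PySem.Set String) :
    (pvScan q r seen).reverse =
      (r.reverse.dedup.filter (fun x => !seen.contains x)).filter q := by
  induction r generalizing seen with
  | nil => simp [pvScan]
  | cons x r ih =>
    have hrev : (x :: r).reverse = r.reverse ++ [x] := by simp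
    rw [hrev, pvDedupAppendSingleton, List.filter_append, List.filter_append]
    have hnodup : r.reverse.dedup.Nodup := r.reverse.nodup_dedup
    by_cases h : seen.contains x = true
    · -- x already seen: both the erase and the [x] piece vanish
      have hm : x ∈ seen := (PySem.Set.contains_iff seen x).1 h
      simp only [pvScan]
      rw [if_pos h, ih]
      have h2 : (List.filter (fun y => !seen.contains y) [x]) = [] := by simp [hm]
      rw [h2, List.filter_nil, List.append_nil,
        pvFilterEraseOfNeg (fun y => !seen.contains y) x (by simp [hm])]
    · have hm : x ∉ seen := fun hx => h ((PySem.Set.contains_iff seen x).2 hx)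
      have h' : seen.contains x = false := by simpa [PySem.Set.contains_iff] using hm
      simp only [pvScan]
      rw [if_neg h, List.reverse_append, ih]
      have h2 : (List.filter (fun y => !seen.contains y) [x]) = [x] := by simp [hm]
      rw [h2]
      have hfe : (List.filter (fun y => !(seen.add x).contains y) r.reverse.dedup)
          = List.filter (fun y => !seen.contains y) (r.reverse.dedup.erase x) := by
        rw [hnodup.erase_eq_filter, List.filter_filter]
        apply List.filter_congr
        intro y _
        rw [pvSetContainsAdd, Bool.not_or]
        cases h1 : seen.contains y <;> cases h2 : (y == x) <;> simp [h1, h2, bne]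
      rw [hfe]
      rcases hq : q x with _ | _
      · simp [hq]
      · simp [hq]


theorem pvGoFlatten (fuel : Nat) (l cur : List Char) (acc : List (List Char)) (h : l.length < fuel) :
    (PySem.Chars.splitOn.go [' '] fuel l cur acc).flatten =
      acc.reverse.flatten ++ cur.reverse ++ l.filter (fun c => !(c == ' ')) := by
  induction fuel generalizing l cur acc with
  | zero => omega
  | succ f ih =>
    cases l with
    | nil => simp [PySem.Chars.splitOn.go]
    | cons c rest =>
      rw [PySem.Chars.splitOn.go]
      by_cases hc : c = ' '
      · subst hc
        have hp : [' '].isPrefixOf (' ' :: rest) = true := by simp [List.isPrefixOf]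
        rw [if_pos hp]
        have hlen : rest.length < f := by simpa using h
        have := ih (List.drop [' '].length (' ' :: rest)) [] ((cur.reverse :: acc)) (by simpa using hlen)
        rw [this]
        simp
      · have hp : [' '].isPrefixOf (c :: rest) = false := by
          simp [List.isPrefixOf]; exact fun hh => hc hh.symm
        rw [if_neg (by simp [hp])]
        have hlen : rest.length < f := by simpa using h
        rw [ih rest (c :: cur) acc hlen]
        simp [hc]

theorem pvFlattenSplitOn (cs : List Char) :
    (PySem.Chars.splitOn cs [' ']).flatten = cs.filter (fun c => !(c == ' ')) := by
  rw [PySem.Chars.splitOn]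
  rw [pvGoFlatten (cs.length + 1) cs [] [] (by omega)]
  simp

theorem mainEq (s : String) : 
    (let words := (PySem.Str.split? s " ").getD []
     words.foldl
      (fun new_str i =>
        i.toList.foldl
          (fun ns j =>
            let js := String.ofList [j]
            if !ns.contains js then ns ++ [js]
            else ns.erase js)
          new_str)
      []) =
      ((s.toList.filter (fun c => !(c == ' '))).map (fun c => String.ofList [c])).dedup.filter
        (fun c => decide (((s.toList.filter (fun c => !(c == ' '))).map (fun c => String.ofList [c])).count c % 2 = 1)) := by
  have hsplit : PySem.Str.split? s " " = some ((PySem.Chars.splitOn s.toList [' ']).map String.ofList) := by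
    rw [PySem.Str.split?, PySem.Chars.split?]; simp
  simp only [hsplit, Option.getD_some, List.foldl_map, String.toList_ofList]
  rw [← List.foldl_flatten, pvFlattenSplitOn]
  rw [← List.foldl_map (f := fun c : Char => String.ofList [c])
    (g := fun (ns : List String) (js : String) => if !ns.contains js then ns ++ [js] else ns.erase js)]
  exact pvToggleEq _

theorem mainEqB (s : String) :
    (let counts : PySem.Dict String Int :=
      s.toList.foldl
        (fun d ch => if ch ≠ ' ' then d.modify (String.ofList [ch]) 0 (· + 1) else d)
        PySem.Dict.empty
     let scanned :=
      s.toList.reverse.foldl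
        (fun (st : List String × PySem.Set String) ch =>
          if ch ≠ ' ' then
            (let s := String.ofList [ch]
             if !st.2.contains s then
               ((if PySem.Int.mod (counts.getD s 0) 2 == 1 then st.1 ++ [s] else st.1), st.2.add s)
             else st)
          else st)
        ([], PySem.Set.empty)
     scanned.1.reverse) =
      ((s.toList.filter (fun c => !(c == ' '))).map (fun c => String.ofList [c])).dedup.filter
        (fun c => decide (((s.toList.filter (fun c => !(c == ' '))).map (fun c => String.ofList [c])).count c % 2 = 1)) := by
  have hpred : (fun x : Char => decide (x ≠ ' ')) = (fun c : Char => !(c == ' ')) := by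
    funext c; rw [Bool.eq_iff_iff]; simp
  simp only []
  rw [PySem.List.foldl_ite_eq_foldl_filter (fun ch : Char => ch ≠ ' ')
      (fun (d : PySem.Dict String Int) ch => d.modify (String.ofList [ch]) 0 (· + 1)) s.toList PySem.Dict.empty,
    hpred,
    ← List.foldl_map (f := fun c : Char => String.ofList [c])
      (g := fun (d : PySem.Dict String Int) k => d.modify k 0 (· + 1))]
  have hcounts : ∀ v : String,
      (List.foldl (fun (d : PySem.Dict String Int) k => d.modify k 0 (· + 1)) PySem.Dict.empty
        ((s.toList.filter (fun c => !(c == ' '))).map (fun c => String.ofList [c]))).getD v 0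
      = (((s.toList.filter (fun c => !(c == ' '))).map (fun c => String.ofList [c])).count v : Int) := by
    intro v
    rw [PySem.Dict.getD_foldl_modify_add_one]
    simp
  simp only [hcounts]
  have hqq : ∀ y : String,
      ((PySem.Int.mod ((((s.toList.filter (fun c => !(c == ' '))).map (fun c => String.ofList [c])).count y : Int)) 2 == 1))
      = decide ((((s.toList.filter (fun c => !(c == ' '))).map (fun c => String.ofList [c])).count y) % 2 = 1) := by
    intro y; rw [Bool.eq_iff_iff]; simp; omega
  simp only [hqq]
  rw [PySem.List.foldl_ite_eq_foldl_filter (fun ch : Char => ch ≠ ' ') _ s.toList.reverse,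
    hpred, List.filter_reverse,
    ← List.foldl_map (f := fun c : Char => String.ofList [c])
      (g := fun (st : List String × PySem.Set String) (y : String) =>
        if !st.2.contains y then
          ((if decide ((((s.toList.filter (fun c => !(c == ' '))).map (fun c => String.ofList [c])).count y) % 2 = 1)
            then st.1 ++ [y] else st.1), st.2.add y)
        else st),
    List.map_reverse, pvScanFoldEq, List.nil_append, pvScanReverse, List.reverse_reverse]
  have hempty : (fun x : String => !(PySem.Set.empty : PySem.Set String).contains x) = fun _ => true := by
    funext x; simp
  rw [hempty, List.filter_true]

-- ===== VERDICT (by name: the statement is the Claim_ definition above) =====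
theorem one_count_symbol_spec : Claim_equal_one_count_symbol := by
  intro s _
  unfold Spec_one_count_symbol one_count_symbol one_count_symbol_alt
  exact (mainEq s).trans (mainEqB s).symm
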